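-- pv_equiv track=rewrite | github.com/google/gazoo-device | gazoo_device/utility/common_utils.py | title_to_snake_case
-- ===== SOURCE A (Python) =====
-- def title_to_snake_case(s):
--   """Convert TitleCase string to snake_case.
--
--   Args:
--       s (str): TitleCase string.
--
--   Returns:
--       str: snake_case string.
--
--   Raises:
--       ValueError: provided string contains underscores.
--
--   Note:
--       consecutive capital characters are supported ("ABc"), but underscores
--       are not.
--   """
--   if "_" in s:
--     raise ValueError(
--         "{} is not a TitleCase string (found underscores).".format(s))
--
--   word_starts = [pos for pos in range(len(s)) if _is_new_word(s, pos)
--                 ] + [len(s)]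
--   words = [
--       s[word_starts[idx]:word_starts[idx + 1]].lower()
--       for idx in range(len(word_starts) - 1)
--   ]
--   return "_".join(words)
--
-- def _is_new_word(s, pos):
--   """Returns whether a new words starts at s[pos] in a TitleCase string."""
--   return (pos == 0 or (s[pos].isupper() and
--                        (not s[pos - 1].isupper() or
--                         (pos + 1 < len(s) and not s[pos + 1].isupper()))))
-- ===== SOURCE B (Python) =====
-- def title_to_snake_case(s):
--   """Convert TitleCase string to snake_case (single streaming pass)."""
--   if "_" in s:
--     raise ValueError(
--         "{} is not a TitleCase string (found underscores).".format(s))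
--   out = []
--   prev_upper = False
--   for pos, ch in enumerate(s):
--     cur_upper = ch.isupper()
--     if pos > 0 and cur_upper and (
--         not prev_upper or (pos + 1 < len(s) and not s[pos + 1].isupper())):
--       out.append("_")
--     out.append(ch.lower())
--     prev_upper = cur_upper
--   return "".join(out)
-- ===== Notes on version B (the rewrite author's own statement) =====
-- stated objective: simpler
-- what changed: Replaced A's three-pass pipeline (build a word-start index list, slice the string at those indices, lowercase and join the slices) by a single streaming scan that carries a previous-char-uppercase flag and emits '_' and the lowered character position by position.
-- outside the precondition, e.g. on title_to_snake_case('_'): A raises ValueError, B raises ValueError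
import Mathlib
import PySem

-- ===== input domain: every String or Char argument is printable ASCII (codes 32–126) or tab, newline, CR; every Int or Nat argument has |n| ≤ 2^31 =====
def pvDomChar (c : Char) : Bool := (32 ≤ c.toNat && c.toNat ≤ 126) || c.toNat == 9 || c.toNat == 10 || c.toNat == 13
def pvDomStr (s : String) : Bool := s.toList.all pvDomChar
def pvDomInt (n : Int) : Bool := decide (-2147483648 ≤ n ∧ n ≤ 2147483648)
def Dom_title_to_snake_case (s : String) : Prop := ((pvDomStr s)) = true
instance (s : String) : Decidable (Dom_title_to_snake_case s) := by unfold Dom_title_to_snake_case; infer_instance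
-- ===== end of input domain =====

-- B replaces A's word-start index list + slicing + join pipeline by a single streaming
-- scan carrying a previous-char-uppercase flag (objective: simpler, one pass, no index table).
-- On strings containing "_" both programs raise ValueError; those inputs are outside Pre_.

-- ===== PORT A =====
def pvIsNewWord (s : String) (pos : Int) : Bool :=
  pos == 0 ||
    (PySem.Chars.isupper (PySem.List.pyGetD s.toList pos ' ') &&
      (!PySem.Chars.isupper (PySem.List.pyGetD s.toList (pos - 1) ' ') ||
        (decide (pos + 1 < PySem.Str.len s) &&
          !PySem.Chars.isupper (PySem.List.pyGetD s.toList (pos + 1) ' '))))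

-- A raises ValueError when "_" occurs in s; Pre_ excludes exactly those inputs.
def title_to_snake_case (s : String) : String :=
  let wordStarts : List Int :=
    ((PySem.List.pyRange 0 (PySem.Str.len s) 1).filter (fun pos => pvIsNewWord s pos))
      ++ [PySem.Str.len s]
  let words : List String :=
    (PySem.List.pyRange 0 ((wordStarts.length : Int) - 1) 1).map (fun idx =>
      PySem.Str.lower (PySem.Str.slice s (some (PySem.List.pyGetD wordStarts idx 0))
        (some (PySem.List.pyGetD wordStarts (idx + 1) 0))))
  PySem.Str.join "_" words

-- ===== PORT B =====
def title_to_snake_case_alt (s : String) : String :=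
  let cs := s.toList
  let res := (PySem.List.enumerate cs 0).foldl
    (fun (acc : List Char × Bool) (p : Int × Char) =>
      let curUpper := PySem.Chars.isupper p.2
      let out :=
        if decide (0 < p.1) && curUpper &&
            (!acc.2 || (decide (p.1 + 1 < (cs.length : Int)) &&
              !PySem.Chars.isupper (PySem.List.pyGetD cs (p.1 + 1) ' '))) then
          acc.1 ++ ['_', PySem.Chars.lowerChar p.2]
        else
          acc.1 ++ [PySem.Chars.lowerChar p.2]
      (out, curUpper))
    ([], false)
  String.ofList res.1

-- ===== PRECONDITION & SPEC =====
-- A raises ValueError exactly when "_" occurs in s; Pre_ excludes those inputs (B raises there too).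
def Pre_title_to_snake_case (s : String) : Prop := PySem.Str.isIn "_" s = false
instance (s : String) : Decidable (Pre_title_to_snake_case s) := by unfold Pre_title_to_snake_case; infer_instance
def pvWitness_title_to_snake_case : String := "FooBar"

def Spec_title_to_snake_case (s : String) (out : String) : Prop := out = title_to_snake_case_alt s
instance (s : String) (out : String) : Decidable (Spec_title_to_snake_case s out) := by unfold Spec_title_to_snake_case; infer_instance

-- ===== CLAIM (what is proved, stated in full; the proofs are below) =====
def Claim_equal_title_to_snake_case : Prop := ∀ (s : String), Dom_title_to_snake_case s → Pre_title_to_snake_case s → Spec_title_to_snake_case s (title_to_snake_case s)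

-- ===== LEMMAS AND PROOFS =====

-- notation for proofs: work on cs = s.toList with Nat indices
def pvUp (cs : List Char) (i : Nat) : Bool := PySem.Chars.isupper (cs.getD i ' ')

-- the "new word at position i ≥ 1" test of both programs, on Nat indices
def pvQ (cs : List Char) (i : Nat) : Bool :=
  pvUp cs i && (!pvUp cs (i - 1) || (decide (i + 1 < cs.length) && !pvUp cs (i + 1)))

def pvItem (cs : List Char) (i : Nat) : List Char :=
  (if decide (0 < i) && pvQ cs i then ['_'] else []) ++ [PySem.Chars.lowerChar (cs.getD i ' ')]

-- the common normal form: one streaming pass over all positions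
def pvM (cs : List Char) : List Char := (List.range cs.length).flatMap (pvItem cs)

def pvSeg (cs : List Char) (a b : Nat) : List Char :=
  PySem.Chars.lower ((cs.drop a).take (b - a))

-- A's join of lowered chunks cut at the starts list (first start a, sentinel cs.length)
def pvChunks (cs : List Char) (a : Nat) : List Nat → List Char
  | [] => pvSeg cs a cs.length
  | b :: bs => pvSeg cs a b ++ '_' :: pvChunks cs b bs

lemma pvIsNewWord_cast (s : String) (i : Nat) :
    pvIsNewWord s (i : Int) = ((i == 0) || pvQ s.toList i) := by
  unfold pvIsNewWord pvQ pvUp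
  cases i with
  | zero => simp
  | succ j =>
    have h0 : (((j + 1 : Nat) : Int) == 0) = false := by
      rw [beq_eq_false_iff_ne]; intro h; omega
    have h1 : ((j + 1 : Nat) : Int) - 1 = ((j : Nat) : Int) := by push_cast; ring
    have h2 : ((j + 1 : Nat) : Int) + 1 = ((j + 2 : Nat) : Int) := by push_cast; ring
    have h3 : ((j + 1 : Nat) == 0) = false := by simp
    rw [h0, h3, PySem.Str.len_eq, h1, h2, PySem.List.pyGetD_natCast, PySem.List.pyGetD_natCast,
      PySem.List.pyGetD_natCast]
    have h4 : (decide (((j + 2 : Nat) : Int) < (s.toList.length : Int))) = decide (j + 1 + 1 < s.toList.length) := by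
      simp; constructor <;> intro h <;> omega
    simp only [Bool.false_or, h4]
    rfl

lemma pvAdjNat {α : Type} (ws : List Int) (g : Int → Int → α) (d : Int) :
    (List.range (ws.length - 1)).map (fun k => g (ws.getD k d) (ws.getD (k + 1) d))
      = (ws.zip ws.tail).map (fun p => g p.1 p.2) := by
  induction ws with
  | nil => simp
  | cons a t ih =>
    cases t with
    | nil => simp
    | cons b t' =>
      simp only [List.length_cons, Nat.add_sub_cancel, List.range_succ_eq_map, List.map_cons,
        List.map_map, List.zip_cons_cons, List.tail_cons]
      refine congrArg₂ _ rfl ?_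
      have := ih
      simp only [List.length_cons, Nat.add_sub_cancel, List.tail_cons] at this
      rw [← this]
      apply List.map_congr_left
      intro k _
      simp [Function.comp, Nat.succ_eq_add_one]

lemma pvAdj {α : Type} (ws : List Int) (f : Int → Int → α) (d : Int) :
    (PySem.List.pyRange 0 ((ws.length : Int) - 1) 1).map
        (fun idx => f (PySem.List.pyGetD ws idx d) (PySem.List.pyGetD ws (idx + 1) d))
      = (ws.zip ws.tail).map (fun p => f p.1 p.2) := by
  rw [PySem.List.pyRange_one]
  have hlen : (((ws.length : Int) - 1) - 0).toNat = ws.length - 1 := by omega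
  rw [hlen, List.map_map, ← pvAdjNat ws f d]
  apply List.map_congr_left
  intro k _
  have : (0 : Int) + (k : Int) = ((k : Nat) : Int) := by ring
  simp only [Function.comp, this]
  have h2 : ((k : Nat) : Int) + 1 = ((k + 1 : Nat) : Int) := by push_cast; ring
  rw [h2, PySem.List.pyGetD_natCast, PySem.List.pyGetD_natCast]

lemma pvJoin (s : String) (ss : List Nat) (a : Nat) :
    (PySem.Str.join "_"
        ((((a :: ss).map (Nat.cast : Nat → Int) ++ [(s.toList.length : Int)]).zip
            (((a :: ss).map (Nat.cast : Nat → Int) ++ [(s.toList.length : Int)]).tail)).map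
          (fun p => PySem.Str.lower (PySem.Str.slice s (some p.1) (some p.2))))).toList
      = pvChunks s.toList a ss := by
  induction ss generalizing a with
  | nil =>
    simp only [List.map_cons, List.map_nil, List.nil_append, List.cons_append, List.zip_cons_cons,
      List.tail_cons, List.zip_nil_right, List.map_nil]
    rw [PySem.Str.toList_join, List.map_cons, List.map_nil, PySem.Chars.join_singleton,
      PySem.Str.toList_lower, PySem.Str.toList_slice, PySem.Chars.slice_eq_listSlice,
      PySem.List.slice_toNat _ (Int.natCast_nonneg _) (Int.natCast_nonneg _)]
    simp [pvChunks, pvSeg, PySem.Chars.lower]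
  | cons b bs ih =>
    obtain ⟨y, Y', hY⟩ : ∃ y Y', bs.map (Nat.cast : Nat → Int) ++ [(s.toList.length : Int)] = y :: Y' := by
      cases hb : bs.map (Nat.cast : Nat → Int) ++ [(s.toList.length : Int)] with
      | nil => simp at hb
      | cons y Y' => exact ⟨y, Y', rfl⟩
    have ihb := ih b
    simp only [List.map_cons, List.cons_append, hY, List.zip_cons_cons, List.tail_cons,
      List.map_cons] at ihb ⊢
    rw [PySem.Str.toList_join, List.map_cons, List.map_cons, PySem.Chars.join_cons_cons]
    rw [PySem.Str.toList_join, List.map_cons] at ihb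
    rw [ihb]
    have hw : (PySem.Str.lower (PySem.Str.slice s (some ((a : Nat) : Int)) (some ((b : Nat) : Int)))).toList
        = pvSeg s.toList a b := by
      rw [PySem.Str.toList_lower, PySem.Str.toList_slice, PySem.Chars.slice_eq_listSlice,
        PySem.List.slice_toNat _ (Int.natCast_nonneg _) (Int.natCast_nonneg _)]
      simp [pvSeg, PySem.Chars.lower]
    rw [hw]
    simp [pvChunks]

lemma pvSeg_succ (cs : List Char) (a m : Nat) (ham : a ≤ m) (hm : m < cs.length) :
    pvSeg cs a (m + 1) = pvSeg cs a m ++ [PySem.Chars.lowerChar (cs.getD m ' ')] := by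
  unfold pvSeg
  have h1 : m + 1 - a = (m - a) + 1 := by omega
  rw [h1, List.take_add_one]
  have h2 : (cs.drop a)[m - a]? = some cs[m] := by
    rw [List.getElem?_drop]
    have : a + (m - a) = m := by omega
    rw [this, List.getElem?_eq_getElem hm]
  rw [h2]
  simp [PySem.Chars.lower, List.getElem?_eq_getElem hm]

lemma pvStream (cs : List Char) (k m a : Nat) (ham : a < m) (hk : m + k = cs.length) :
    pvChunks cs a ((List.range' m k).filter (pvQ cs))
      = pvSeg cs a m ++ (List.range' m k).flatMap (pvItem cs) := by
  induction k generalizing m a with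
  | zero =>
    simp only [List.range'_zero, List.filter_nil, List.flatMap_nil, List.append_nil]
    have : m = cs.length := by omega
    rw [this]; rfl
  | succ k ih =>
    rw [List.range'_succ]
    have hmlt : m < cs.length := by omega
    cases hq : pvQ cs m with
    | true =>
      rw [List.filter_cons_of_pos (by simp [hq])]
      show pvSeg cs a m ++ '_' :: pvChunks cs m ((List.range' (m + 1) k).filter (pvQ cs)) = _
      rw [ih (m + 1) m (by omega) (by omega)]
      rw [List.flatMap_cons]
      have hitem : pvItem cs m = ['_', PySem.Chars.lowerChar (cs.getD m ' ')] := by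
        unfold pvItem
        have h0 : (decide (0 < m)) = true := by simp only [decide_eq_true_eq]; omega
        rw [hq, h0]
        rfl
      have hseg1 : pvSeg cs m (m + 1) = [PySem.Chars.lowerChar (cs.getD m ' ')] := by
        have := pvSeg_succ cs m m (le_refl m) hmlt
        rw [this]
        unfold pvSeg
        simp [PySem.Chars.lower]
      rw [hitem, hseg1]
      simp
    | false =>
      rw [List.filter_cons_of_neg (by simp [hq])]
      rw [ih (m + 1) a (by omega) (by omega)]
      rw [List.flatMap_cons]
      have hitem : pvItem cs m = [PySem.Chars.lowerChar (cs.getD m ' ')] := by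
        unfold pvItem
        rw [hq]
        simp
      rw [hitem, pvSeg_succ cs a m (by omega) hmlt]
      simp

lemma pvA_eq (s : String) : (title_to_snake_case s).toList = pvM s.toList := by
  unfold title_to_snake_case
  cases hcs : s.toList with
  | nil =>
    have hlen : PySem.Str.len s = 0 := by rw [PySem.Str.len_eq, hcs]; rfl
    rw [hlen]
    have h2 : PySem.List.pyRange 0 0 1 = ([] : List Int) := by rfl
    rw [h2]
    simp only [List.filter_nil, List.nil_append, List.length_cons, List.length_nil]
    have h3 : ((0 + 1 : Nat) : Int) - 1 = 0 := by norm_num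
    rw [h3, h2]
    simp only [List.map_nil]
    rw [PySem.Str.toList_join]
    simp [pvM, PySem.Chars.join_nil]
  | cons c cs' =>
    have hn : 1 ≤ s.toList.length := by rw [hcs]; simp
    -- step 1: word starts = (0 :: ss).map cast ++ [n]
    have hlen : PySem.Str.len s = (s.toList.length : Int) := PySem.Str.len_eq s
    have hws : (PySem.List.pyRange 0 (PySem.Str.len s) 1).filter (fun pos => pvIsNewWord s pos)
        = ((0 :: (List.range' 1 (s.toList.length - 1)).filter (pvQ s.toList)).map (Nat.cast : Nat → Int)) := by
      rw [hlen, PySem.List.pyRange_one]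
      have h0 : ((s.toList.length : Int) - 0).toNat = s.toList.length := by omega
      rw [h0]
      simp only [zero_add]
      rw [List.filter_map]
      congr 1
      have hfc : List.filter ((fun pos => pvIsNewWord s pos) ∘ fun k : Nat => ((k : Nat) : Int))
            (List.range s.toList.length)
          = List.filter (fun i => (i == 0) || pvQ s.toList i) (List.range s.toList.length) :=
        List.filter_congr (fun i _ => pvIsNewWord_cast s i)
      rw [hfc]
      have hrange : List.range s.toList.length = 0 :: List.range' 1 (s.toList.length - 1) := by
        rw [List.range_eq_range']
        have h : s.toList.length = (s.toList.length - 1) + 1 := by omega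
        conv_lhs => rw [h]
        rw [List.range'_succ]
      rw [hrange, List.filter_cons_of_pos (by simp)]
      congr 1
      apply List.filter_congr
      intro i hi
      have : 1 ≤ i := (List.mem_range'_1.mp hi).1
      have h0i : (i == 0) = false := by simp; omega
      rw [h0i, Bool.false_or]
    rw [hws, hlen]
    dsimp only
    set ss := (List.range' 1 (s.toList.length - 1)).filter (pvQ s.toList) with hss
    rw [pvAdj (((0 :: ss).map (Nat.cast : Nat → Int)) ++ [(s.toList.length : Int)])
      (fun x y => PySem.Str.lower (PySem.Str.slice s (some x) (some y))) 0]
    rw [pvJoin s ss 0]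
    rw [pvStream s.toList (s.toList.length - 1) 1 0 (by omega) (by omega)]
    have hseg01 : pvSeg s.toList 0 1 = [PySem.Chars.lowerChar (s.toList.getD 0 ' ')] := by
      unfold pvSeg
      rw [hcs]
      simp [PySem.Chars.lower]
    have hM : pvM s.toList = pvItem s.toList 0 ++ (List.range' 1 (s.toList.length - 1)).flatMap (pvItem s.toList) := by
      unfold pvM
      have hrange : List.range s.toList.length = 0 :: List.range' 1 (s.toList.length - 1) := by
        rw [List.range_eq_range']
        have h : s.toList.length = (s.toList.length - 1) + 1 := by omega
        conv_lhs => rw [h]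
        rw [List.range'_succ]
      rw [hrange, List.flatMap_cons]
    have hitem0 : pvItem s.toList 0 = [PySem.Chars.lowerChar (s.toList.getD 0 ' ')] := by
      unfold pvItem; simp
    rw [← hcs, hM, hitem0, hseg01]

def pvStep (cs : List Char) (acc : List Char × Bool) (p : Int × Char) : List Char × Bool :=
  let curUpper := PySem.Chars.isupper p.2
  let out :=
    if decide (0 < p.1) && curUpper &&
        (!acc.2 || (decide (p.1 + 1 < (cs.length : Int)) &&
          !PySem.Chars.isupper (PySem.List.pyGetD cs (p.1 + 1) ' '))) then
      acc.1 ++ ['_', PySem.Chars.lowerChar p.2]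
    else
      acc.1 ++ [PySem.Chars.lowerChar p.2]
  (out, curUpper)

lemma pvFold (cs : List Char) (l : List Char) (k : Nat) (out : List Char) (flag : Bool)
    (hl : l = cs.drop k) (hf : 1 ≤ k → flag = pvUp cs (k - 1)) :
    ((PySem.List.enumerate l (k : Int)).foldl (pvStep cs) (out, flag)).1
    = out ++ (List.range' k (cs.length - k)).flatMap (pvItem cs) := by
  induction l generalizing k out flag with
  | nil =>
    have hk : cs.length ≤ k := by
      by_contra h
      have := List.drop_eq_nil_iff.mp hl.symm
      omega
    have h : cs.length - k = 0 := by omega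
    rw [h]
    simp [PySem.List.enumerate_nil]
  | cons c l' ih =>
    have hklt : k < cs.length := by
      by_contra h
      rw [List.drop_eq_nil_iff.mpr (by omega)] at hl
      exact (List.cons_ne_nil c l') hl
    have hc : c = cs.getD k ' ' := by
      rw [List.getD_eq_getElem _ _ hklt]
      have := List.drop_eq_getElem_cons hklt
      rw [← hl] at this
      exact (List.cons.injEq _ _ _ _).mp this |>.1
    have hl' : l' = cs.drop (k + 1) := by
      have := List.drop_eq_getElem_cons hklt
      rw [← hl] at this
      exact (List.cons.injEq _ _ _ _).mp this |>.2
    rw [PySem.List.enumerate_cons, List.foldl_cons]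
    have hcast : ((k : Int) + 1) = ((k + 1 : Nat) : Int) := by push_cast; ring
    have hcond : (decide (0 < (k : Int)) && PySem.Chars.isupper c &&
        (!flag || (decide ((k : Int) + 1 < (cs.length : Int)) &&
          !PySem.Chars.isupper (PySem.List.pyGetD cs ((k : Int) + 1) ' '))))
        = (decide (0 < k) && pvQ cs k) := by
      rw [hcast, PySem.List.pyGetD_natCast]
      cases k with
      | zero => simp
      | succ j =>
        have h1 : (decide (0 < ((j + 1 : Nat) : Int))) = true := by simp
        have h2 : (decide (0 < j + 1)) = true := by simp
        have h3 : (decide (((j + 1 + 1 : Nat) : Int) < (cs.length : Int))) = decide (j + 1 + 1 < cs.length) := by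
          simp; omega
        rw [h1, h2, h3, Bool.true_and, Bool.true_and]
        unfold pvQ pvUp
        rw [hf (by omega), hc]
        simp [pvUp]
    have happ : pvStep cs (out, flag) ((k : Int), c)
        = ((if decide (0 < k) && pvQ cs k then out ++ ['_', PySem.Chars.lowerChar c]
            else out ++ [PySem.Chars.lowerChar c]), PySem.Chars.isupper c) := by
      unfold pvStep
      dsimp only
      rw [hcond]
    rw [happ]
    have hlen1 : cs.length - k = (cs.length - (k + 1)) + 1 := by omega
    rw [hlen1, List.range'_succ, List.flatMap_cons]
    by_cases hC : (decide (0 < k) && pvQ cs k) = true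
    · rw [if_pos hC]
      rw [hcast, ih (k + 1) (out ++ ['_', PySem.Chars.lowerChar c]) (PySem.Chars.isupper c) hl'
        (fun _ => by unfold pvUp; rw [Nat.add_sub_cancel, ← hc])]
      have hi : pvItem cs k = ['_', PySem.Chars.lowerChar (cs.getD k ' ')] := by
        unfold pvItem; rw [hC]; rfl
      rw [hi, ← hc]
      simp
    · rw [if_neg hC]
      have hC' : (decide (0 < k) && pvQ cs k) = false := by
        revert hC; cases (decide (0 < k) && pvQ cs k) <;> simp
      rw [hcast, ih (k + 1) (out ++ [PySem.Chars.lowerChar c]) (PySem.Chars.isupper c) hl'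
        (fun _ => by unfold pvUp; rw [Nat.add_sub_cancel, ← hc])]
      have hi : pvItem cs k = [PySem.Chars.lowerChar (cs.getD k ' ')] := by
        unfold pvItem; rw [hC']; rfl
      rw [hi, ← hc]
      simp

lemma pvB_eq (s : String) : title_to_snake_case_alt s = String.ofList (pvM s.toList) := by
  unfold title_to_snake_case_alt
  show String.ofList ((PySem.List.enumerate s.toList (0 : Int)).foldl (pvStep s.toList) ([], false)).1 = _
  have h0 : (0 : Int) = ((0 : Nat) : Int) := by norm_num
  rw [h0, pvFold s.toList s.toList 0 [] false (by simp) (by omega)]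
  simp only [Nat.sub_zero, List.nil_append]
  unfold pvM
  rw [List.range_eq_range']
-- ===== VERDICT (by name: the statement is the Claim_ definition above) =====
theorem title_to_snake_case_spec : Claim_equal_title_to_snake_case := by
  intro s _ _
  unfold Spec_title_to_snake_case
  rw [pvB_eq, ← pvA_eq, String.ofList_toList]
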